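-- pv_equiv track=rewrite | github.com/Fliite/Fliite | SPE D/Fiche exercice1/exercice1.py | exercice1
-- ===== SOURCE A (Python) =====
-- def exercice1(parcours):
--     ParcourSimplifie = []
--     x = 0
--     y = 0
--     for i in parcours:
--         if i[1] == 'n':
--             y += i[0]
--         elif i[1] == 's':
--             y -= i[0]
--         elif i[1] == 'e':
--             x += i[0]
--         elif i[1] == 'o':
--             x -= i[0]
--     if y > 0:
--         ParcourSimplifie.append([y, 'n'])
--     else:
--         ParcourSimplifie.append([y, 's'])
--     if x > 0:
--         ParcourSimplifie.append([x, 'e'])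
--     else:
--         ParcourSimplifie.append([x, 'o'])
--     return ParcourSimplifie
-- ===== SOURCE B (Python) =====
-- def exercice1(parcours):
--     # Stateless, declarative version: no running accumulators at all.
--     # Four independent filter-and-sum passes give the net displacement.
--     def total(letter):
--         return sum(m for m, d in parcours if d == letter)
--     y = total('n') - total('s')
--     x = total('e') - total('o')
--     return [[y, 'n' if y > 0 else 's'], [x, 'e' if x > 0 else 'o']]
-- ===== Notes on version B (the rewrite author's own statement) =====
-- stated objective: simpler
-- what changed: Replaces A's single stateful loop with a four-way if/elif updating two mutable accumulators by a stateless decomposition: four independent filter-and-sum passes (one per direction letter), whose differences give the net x/y directly.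
import Mathlib
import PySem

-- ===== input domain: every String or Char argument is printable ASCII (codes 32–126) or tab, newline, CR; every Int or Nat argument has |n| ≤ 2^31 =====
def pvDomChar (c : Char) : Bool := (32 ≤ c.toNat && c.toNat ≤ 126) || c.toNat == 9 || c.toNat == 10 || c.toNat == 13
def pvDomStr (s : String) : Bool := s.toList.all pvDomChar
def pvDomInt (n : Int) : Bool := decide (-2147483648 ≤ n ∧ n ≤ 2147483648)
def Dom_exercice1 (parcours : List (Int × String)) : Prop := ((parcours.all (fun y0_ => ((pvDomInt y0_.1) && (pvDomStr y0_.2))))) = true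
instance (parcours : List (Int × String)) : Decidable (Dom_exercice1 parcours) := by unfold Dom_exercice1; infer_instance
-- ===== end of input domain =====

-- B replaces A's stateful accumulator loop by four independent stateless
-- filter-and-sum passes, one per direction letter (objective: simpler).


-- ===== PORT A =====
-- the for-loop state (x, y); branches in A's order, unknown letters leave the state unchanged
def exercice1Step (st : Int × Int) (i : Int × String) : Int × Int :=
  if i.2 == "n" then (st.1, st.2 + i.1)
  else if i.2 == "s" then (st.1, st.2 - i.1)
  else if i.2 == "e" then (st.1 + i.1, st.2)
  else if i.2 == "o" then (st.1 - i.1, st.2)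
  else st

def exercice1 (parcours : List (Int × String)) : List (Int × String) :=
  let st := parcours.foldl exercice1Step (0, 0)
  let x := st.1
  let y := st.2
  (if y > 0 then [(y, "n")] else [(y, "s")]) ++ (if x > 0 then [(x, "e")] else [(x, "o")])

-- ===== PORT B =====
-- sum(m for m, d in parcours if d == letter): filter, project, sum
def exercice1Total (parcours : List (Int × String)) (letter : String) : Int :=
  ((parcours.filter (fun p => p.2 == letter)).map Prod.fst).sum

def exercice1_alt (parcours : List (Int × String)) : List (Int × String) :=
  let y := exercice1Total parcours "n" - exercice1Total parcours "s"
  let x := exercice1Total parcours "e" - exercice1Total parcours "o"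
  [(y, if y > 0 then "n" else "s"), (x, if x > 0 then "e" else "o")]

-- ===== PRECONDITION & SPEC =====
def Spec_exercice1 (parcours : List (Int × String)) (out : List (Int × String)) : Prop := out = exercice1_alt parcours
instance (parcours : List (Int × String)) (out : List (Int × String)) : Decidable (Spec_exercice1 parcours out) := by unfold Spec_exercice1; infer_instance

-- ===== CLAIM (what is proved, stated in full; the proofs are below) =====
def Claim_equal_exercice1 : Prop := ∀ (parcours : List (Int × String)), Dom_exercice1 parcours → Spec_exercice1 parcours (exercice1 parcours)

-- ===== LEMMAS AND PROOFS =====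
theorem pvTotal_cons (v : Int) (k : String) (t : List (Int × String)) (letter : String) :
    exercice1Total ((v, k) :: t) letter =
      (if k == letter then v else 0) + exercice1Total t letter := by
  by_cases h : k == letter <;> simp [exercice1Total, h]

theorem pvFold_totals (l : List (Int × String)) (a b : Int) :
    l.foldl exercice1Step (a, b) =
      (a + exercice1Total l "e" - exercice1Total l "o",
       b + exercice1Total l "n" - exercice1Total l "s") := by
  induction l generalizing a b with
  | nil => simp [exercice1Total]
  | cons i t ih =>
    obtain ⟨v, k⟩ := i
    simp only [List.foldl_cons, pvTotal_cons]
    by_cases hn : k = "n"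
    · simp only [exercice1Step, hn]; simp [ih]; omega
    by_cases hs : k = "s"
    · simp only [exercice1Step, hs]; simp [ih]; omega
    by_cases he : k = "e"
    · simp only [exercice1Step, he]; simp [ih]; omega
    by_cases ho : k = "o"
    · simp only [exercice1Step, ho]; simp [ih]; omega
    · simp only [exercice1Step]
      simp [hn, hs, he, ho, ih]

-- ===== VERDICT (by name: the statement is the Claim_ definition above) =====
theorem exercice1_spec : Claim_equal_exercice1 := by
  intro parcours _
  unfold Spec_exercice1 exercice1 exercice1_alt
  rw [pvFold_totals]
  simp only [Int.zero_add]
  split_ifs <;> simp
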